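-- pv_equiv track=rewrite | github.com/JetBrains-Research/lca-baselines | project_level_code_completion/composers/file_length_composer.py | _get_filelengths
-- ===== SOURCE A (Python) =====
-- def _get_filelengths(context: dict[str, str]) -> dict[int, str]:
--     set_of_len = set([len(file) for file in context.values()])
--     if len(context) == len(set_of_len):
--         len_to_path = {len(file): path for path, file in context.items()}
--         return len_to_path
--     else:
--         len_to_path = dict()
--         for path, file in context.items():
--             if len(file) not in len_to_path.keys():
--                 len_to_path[len(file)] = path
--             else:
--                 new_key = len(file) + 1
--                 while new_key in len_to_path.keys():
--                     new_key += 1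
--                 len_to_path[new_key] = path
--         return len_to_path
-- ===== SOURCE B (Python) =====
-- def _get_filelengths(context: dict[str, str]) -> dict[int, str]:
--     # Union-find "next free slot" pointers with path compression instead of
--     # re-scanning the result dict key by key.
--     parent: dict[int, int] = {}
--
--     def find(k: int) -> int:
--         trail = []
--         while k in parent:
--             trail.append(k)
--             k = parent[k]
--         for t in trail:
--             parent[t] = k
--         return k
--
--     len_to_path: dict[int, str] = {}
--     for path, file in context.items():
--         slot = find(len(file))
--         len_to_path[slot] = path
--         parent[slot] = slot + 1
--     return len_to_path
-- ===== Notes on version B (the rewrite author's own statement) =====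
-- stated objective: faster
-- what changed: Collision resolution: A linearly re-probes the result dict key by key (new_key += 1 while occupied); B keeps a union-find 'next free slot' pointer map with path compression, so repeated collisions jump straight past known-occupied runs, and B drops A's separate all-lengths-distinct fast path.
import Mathlib
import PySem

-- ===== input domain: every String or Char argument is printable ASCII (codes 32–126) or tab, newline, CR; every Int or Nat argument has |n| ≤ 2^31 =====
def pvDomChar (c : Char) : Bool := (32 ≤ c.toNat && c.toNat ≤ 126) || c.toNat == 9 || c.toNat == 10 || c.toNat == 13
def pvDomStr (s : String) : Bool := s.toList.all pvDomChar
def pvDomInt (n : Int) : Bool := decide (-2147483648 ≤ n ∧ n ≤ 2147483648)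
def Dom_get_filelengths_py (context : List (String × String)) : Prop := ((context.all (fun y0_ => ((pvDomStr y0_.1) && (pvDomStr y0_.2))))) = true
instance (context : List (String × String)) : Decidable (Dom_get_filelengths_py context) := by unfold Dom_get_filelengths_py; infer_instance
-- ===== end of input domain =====

-- B replaces A's per-collision linear re-scan of the result dict by a union-find
-- "next free slot" pointer structure with path compression (objective: faster on
-- collision-heavy inputs; identical return value).

-- ===== PORT A =====
-- 'new_key = len+1; while new_key in len_to_path: new_key += 1' (fuel-guarded;
-- fuel d.size+1 is proven sufficient below, so the guard never fires)
def pvProbe (d : PySem.Dict Int String) (fuel : Nat) (k : Int) : Int :=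
  match fuel with
  | 0 => k
  | fuel + 1 => if d.contains k then pvProbe d fuel (k + 1) else k

-- one iteration of A's 'for path, file in context.items()' loop (else branch)
def pvAStep (d : PySem.Dict Int String) (p : String × String) : PySem.Dict Int String :=
  if d.contains (PySem.Str.len p.2) then
    d.insert (pvProbe d (d.size + 1) (PySem.Str.len p.2 + 1)) p.1
  else
    d.insert (PySem.Str.len p.2) p.1

def get_filelengths_py (context : List (String × String)) : List (Int × String) :=
  let set_of_len := PySem.Set.ofList (context.map (fun p => PySem.Str.len p.2))
  if context.length = set_of_len.length then
    (context.foldl (fun d p => d.insert (PySem.Str.len p.2) p.1) PySem.Dict.empty).items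
  else
    (context.foldl pvAStep PySem.Dict.empty).items

-- ===== PORT B =====
-- Source B's find(): follow the 'parent' pointers collecting the trail (fuel-guarded;
-- fuel par.size+1 is proven sufficient below, so the guard never fires)
def pvFind (par : PySem.Dict Int Int) (fuel : Nat) (k : Int) (trail : List Int) :
    Int × List Int :=
  match fuel with
  | 0 => (k, trail)
  | fuel + 1 =>
    match par.get? k with
    | none => (k, trail)
    | some j => pvFind par fuel j (trail ++ [k])

-- one iteration of Source B's loop: find slot (with path compression of the trail),
-- record it, point the slot at slot+1
def pvBStep (st : PySem.Dict Int String × PySem.Dict Int Int) (p : String × String) :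
    PySem.Dict Int String × PySem.Dict Int Int :=
  let r := pvFind st.2 (st.2.size + 1) (PySem.Str.len p.2) []
  let par := (r.2.foldl (fun q t => q.insert t r.1) st.2).insert r.1 (r.1 + 1)
  (st.1.insert r.1 p.1, par)

def get_filelengths_py_alt (context : List (String × String)) : List (Int × String) :=
  (context.foldl pvBStep (PySem.Dict.empty, PySem.Dict.empty)).1.items

-- ===== PRECONDITION & SPEC =====
def Spec_get_filelengths_py (context : List (String × String)) (out : List (Int × String)) : Prop := out = get_filelengths_py_alt context
instance (context : List (String × String)) (out : List (Int × String)) : Decidable (Spec_get_filelengths_py context out) := by unfold Spec_get_filelengths_py; infer_instance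

-- ===== CLAIM (what is proved, stated in full; the proofs are below) =====
def Claim_equal_get_filelengths_py : Prop := ∀ (context : List (String × String)), Dom_get_filelengths_py context → Spec_get_filelengths_py context (get_filelengths_py context)

-- ===== LEMMAS AND PROOFS =====

-- the occupied slots of A's dict and B's parent map coincide, and every parent
-- pointer jumps forward over occupied slots only
def pvInv (d : PySem.Dict Int String) (par : PySem.Dict Int Int) : Prop :=
  d.keys.Nodup ∧ par.keys.Nodup ∧
  (∀ k, par.contains k = d.contains k) ∧
  (∀ k j, par.get? k = some j → k < j ∧ ∀ z, k ≤ z → z < j → par.contains z = true)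

-- r is the first free slot ≥ k
def pvIsSlot (c : Int → Bool) (k r : Int) : Prop :=
  k ≤ r ∧ c r = false ∧ ∀ z, k ≤ z → z < r → c z = true

theorem pvSlot_unique {c : Int → Bool} {k r r' : Int}
    (h : pvIsSlot c k r) (h' : pvIsSlot c k r') : r = r' := by
  obtain ⟨hk, hf, hcov⟩ := h
  obtain ⟨hk', hf', hcov'⟩ := h'
  rcases lt_trichotomy r r' with hlt | heq | hgt
  · have := hcov' r hk hlt; rw [this] at hf; cases hf
  · exact heq
  · have := hcov r' hk' hgt; rw [this] at hf'; cases hf'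

theorem pvProbe_spec (d : PySem.Dict Int String) :
    ∀ (fuel : Nat) (k : Int),
      (d.keys.filter (fun x => decide (k ≤ x))).length < fuel →
      pvIsSlot d.contains k (pvProbe d fuel k) := by
  intro fuel
  induction fuel with
  | zero => intro k h; omega
  | succ fuel ih =>
    intro k h
    by_cases hc : d.contains k
    · have hmem : k ∈ d.keys.filter (fun x => decide (k ≤ x)) := by
        simp [List.mem_filter, ← PySem.Dict.contains_iff_mem_keys, hc]
      have hsub : (d.keys.filter (fun x => decide (k + 1 ≤ x))) =
          ((d.keys.filter (fun x => decide (k ≤ x))).filter (fun x => decide (¬ x = k))) := by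
        rw [List.filter_filter]
        apply List.filter_congr
        intro a _
        by_cases h1 : k + 1 ≤ a <;> by_cases h2 : a = k <;> simp_all <;> omega
      have hlt : ((d.keys.filter (fun x => decide (k ≤ x))).filter
          (fun x => decide (¬ x = k))).length < (d.keys.filter (fun x => decide (k ≤ x))).length := by
        rw [List.length_filter_lt_length_iff_exists]
        exact ⟨k, hmem, by simp⟩
      have hrec := ih (k + 1) (by rw [hsub]; omega)
      obtain ⟨h1, h2, h3⟩ := hrec
      rw [show pvProbe d (fuel + 1) k = pvProbe d fuel (k + 1) from by simp [pvProbe, hc]]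
      refine ⟨by omega, h2, ?_⟩
      intro z hz1 hz2
      rcases eq_or_lt_of_le hz1 with rfl | hlt2
      · exact hc
      · exact h3 z (by omega) hz2
    · simp only [Bool.not_eq_true] at hc
      rw [show pvProbe d (fuel + 1) k = k from by simp [pvProbe, hc]]
      exact ⟨le_refl k, hc, by intro z h1 h2; omega⟩

theorem pvFind_spec (par : PySem.Dict Int Int)
    (hI2 : ∀ k j, par.get? k = some j → k < j ∧ ∀ z, k ≤ z → z < j → par.contains z = true) :
    ∀ (fuel : Nat) (k : Int) (trail : List Int),
      (par.keys.filter (fun x => decide (k ≤ x))).length < fuel →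
      pvIsSlot par.contains k (pvFind par fuel k trail).1 ∧
      ∃ vis, (pvFind par fuel k trail).2 = trail ++ vis ∧
        ∀ t ∈ vis, par.contains t = true ∧ t < (pvFind par fuel k trail).1 ∧
          ∀ z, t ≤ z → z < (pvFind par fuel k trail).1 → par.contains z = true := by
  intro fuel
  induction fuel with
  | zero => intro k trail h; omega
  | succ fuel ih =>
    intro k trail h
    cases hg : par.get? k with
    | none =>
      have hc : par.contains k = false := (PySem.Dict.get?_eq_none_iff_contains par k).mp hg
      rw [show pvFind par (fuel + 1) k trail = (k, trail) from by simp [pvFind, hg]]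
      refine ⟨⟨le_refl k, hc, by intro z h1 h2; omega⟩, [], by simp, by simp⟩
    | some j =>
      obtain ⟨hkj, hcov⟩ := hI2 k j hg
      have hck : par.contains k = true := hcov k (le_refl k) hkj
      have hmem : k ∈ par.keys.filter (fun x => decide (k ≤ x)) := by
        simp [List.mem_filter, ← PySem.Dict.contains_iff_mem_keys, hck]
      have hsub : (par.keys.filter (fun x => decide (j ≤ x))) =
          ((par.keys.filter (fun x => decide (k ≤ x))).filter (fun x => decide (j ≤ x))) := by
        rw [List.filter_filter]
        apply List.filter_congr
        intro a _
        by_cases h1 : j ≤ a <;> by_cases h2 : k ≤ a <;> simp [h1, h2] <;> omega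
      have hlt : ((par.keys.filter (fun x => decide (k ≤ x))).filter
          (fun x => decide (j ≤ x))).length < (par.keys.filter (fun x => decide (k ≤ x))).length := by
        rw [List.length_filter_lt_length_iff_exists]
        exact ⟨k, hmem, by simp; omega⟩
      have hrec := ih j (trail ++ [k]) (by rw [hsub]; omega)
      rw [show pvFind par (fuel + 1) k trail = pvFind par fuel j (trail ++ [k]) from by
        simp [pvFind, hg]]
      obtain ⟨⟨h1, h2, h3⟩, vis, hv1, hv2⟩ := hrec
      have hcovkr : ∀ z, k ≤ z → z < (pvFind par fuel j (trail ++ [k])).1 → par.contains z = true := by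
        intro z hz1 hz2
        by_cases hzj : z < j
        · exact hcov z hz1 hzj
        · exact h3 z (by omega) hz2
      refine ⟨⟨by omega, h2, hcovkr⟩, k :: vis, by simp [hv1], ?_⟩
      intro t ht
      rcases List.mem_cons.mp ht with rfl | ht'
      · exact ⟨hck, by omega, hcovkr⟩
      · obtain ⟨a, b, c⟩ := hv2 t ht'
        exact ⟨a, b, c⟩

theorem pvCompress_inv (root : Int) :
    ∀ (vis : List Int) (d : PySem.Dict Int String) (par : PySem.Dict Int Int),
      pvInv d par →
      (∀ t ∈ vis, par.contains t = true ∧ t < root ∧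
        ∀ z, t ≤ z → z < root → par.contains z = true) →
      pvInv d (vis.foldl (fun q t => q.insert t root) par) ∧
      (∀ k, (vis.foldl (fun q t => q.insert t root) par).contains k = par.contains k) := by
  intro vis
  induction vis with
  | nil => intro d par hI _; exact ⟨hI, fun k => rfl⟩
  | cons t vis ih =>
    intro d par hI hvis
    obtain ⟨hct, htr, hcov⟩ := hvis t (List.mem_cons_self)
    obtain ⟨hnd, hnp, hI1, hI2⟩ := hI
    have hceq : ∀ k, (par.insert t root).contains k = par.contains k := by
      intro k
      rw [PySem.Dict.contains_insert]
      by_cases hk : k = t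
      · subst hk; simp [hct]
      · simp [hk]
    have hI' : pvInv d (par.insert t root) := by
      refine ⟨hnd, PySem.Dict.nodup_keys_insert par t root hnp, fun k => by rw [hceq, hI1], ?_⟩
      intro k j hg
      rw [PySem.Dict.get?_insert] at hg
      by_cases hk : k = t
      · rw [if_pos hk] at hg
        injection hg with hg; subst hg; subst hk
        exact ⟨htr, fun z h1 h2 => by rw [hceq]; exact hcov z h1 h2⟩
      · rw [if_neg hk] at hg
        obtain ⟨a, b⟩ := hI2 k j hg
        exact ⟨a, fun z h1 h2 => by rw [hceq]; exact b z h1 h2⟩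
    have hvis' : ∀ t' ∈ vis, (par.insert t root).contains t' = true ∧ t' < root ∧
        ∀ z, t' ≤ z → z < root → (par.insert t root).contains z = true := by
      intro t' ht'
      obtain ⟨a, b, c⟩ := hvis t' (List.mem_cons_of_mem t ht')
      exact ⟨by rw [hceq]; exact a, b, fun z h1 h2 => by rw [hceq]; exact c z h1 h2⟩
    obtain ⟨hfin, hfc⟩ := ih d (par.insert t root) hI' hvis'
    exact ⟨by simpa using hfin, fun k => by simpa using (hfc k).trans (hceq k)⟩

theorem pvUnion_inv (d : PySem.Dict Int String) (par : PySem.Dict Int Int) (r : Int)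
    (v : String) (hI : pvInv d par) (hr : d.contains r = false) :
    pvInv (d.insert r v) (par.insert r (r + 1)) := by
  obtain ⟨hnd, hnp, hI1, hI2⟩ := hI
  have hceq : ∀ k, (par.insert r (r + 1)).contains k = (d.insert r v).contains k := by
    intro k
    rw [PySem.Dict.contains_insert, PySem.Dict.contains_insert, hI1]
  refine ⟨PySem.Dict.nodup_keys_insert d r v hnd,
    PySem.Dict.nodup_keys_insert par r (r + 1) hnp, hceq, ?_⟩
  intro k j hg
  rw [PySem.Dict.get?_insert] at hg
  by_cases hk : k = r
  · rw [if_pos hk] at hg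
    injection hg with hg; subst hg; subst hk
    refine ⟨by omega, ?_⟩
    intro z h1 h2
    have hz : z = k := by omega
    subst hz
    rw [PySem.Dict.contains_insert]; simp
  · rw [if_neg hk] at hg
    obtain ⟨a, b⟩ := hI2 k j hg
    refine ⟨a, ?_⟩
    intro z h1 h2
    rw [PySem.Dict.contains_insert]
    rw [b z h1 h2]; simp

theorem pvStep (d : PySem.Dict Int String) (par : PySem.Dict Int Int)
    (p : String × String) (hI : pvInv d par) :
    pvAStep d p = (pvBStep (d, par) p).1 ∧ pvInv (pvAStep d p) (pvBStep (d, par) p).2 := by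
  obtain ⟨hnd, hnp, hI1, hI2⟩ := hI
  have hkl : d.keys.length = d.size := by simp [PySem.Dict.size, PySem.Dict.keys]
  have hkp : par.keys.length = par.size := by simp [PySem.Dict.size, PySem.Dict.keys]
  by_cases hc : d.contains (PySem.Str.len p.2) = true
  · have hcp : par.contains (PySem.Str.len p.2) = true := by rw [hI1]; exact hc
    have hbndB : (par.keys.filter (fun x => decide (PySem.Str.len p.2 ≤ x))).length
        < par.size + 1 := by
      have := List.length_filter_le (fun x => decide (PySem.Str.len p.2 ≤ x)) par.keys
      omega
    obtain ⟨⟨hfk, hff, hfcov⟩, vis, hveq, hvp⟩ :=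
      pvFind_spec par hI2 (par.size + 1) (PySem.Str.len p.2) [] hbndB
    set r := (pvFind par (par.size + 1) (PySem.Str.len p.2) []).1 with hr
    have hslotB : pvIsSlot d.contains (PySem.Str.len p.2 + 1) r := by
      have hne : r ≠ PySem.Str.len p.2 := by
        intro h; rw [h, hcp] at hff; cases hff
      refine ⟨by omega, by rw [← hI1]; exact hff, ?_⟩
      intro z h1 h2
      rw [← hI1]
      exact hfcov z (by omega) h2
    have hbndA : (d.keys.filter (fun x => decide (PySem.Str.len p.2 + 1 ≤ x))).length
        < d.size + 1 := by
      have := List.length_filter_le (fun x => decide (PySem.Str.len p.2 + 1 ≤ x)) d.keys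
      omega
    have hslotA := pvProbe_spec d (d.size + 1) (PySem.Str.len p.2 + 1) hbndA
    have hnk : pvProbe d (d.size + 1) (PySem.Str.len p.2 + 1) = r :=
      pvSlot_unique hslotA hslotB
    have hvis : (pvFind par (par.size + 1) (PySem.Str.len p.2) []).2 = vis := by
      simpa using hveq
    obtain ⟨hIC, hCeq⟩ := pvCompress_inv r vis d par ⟨hnd, hnp, hI1, hI2⟩ hvp
    have hBeq : pvBStep (d, par) p =
        (d.insert r p.1,
          (vis.foldl (fun q t => q.insert t r) par).insert r (r + 1)) := by
      simp only [pvBStep, ← hr, hvis]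
    have hAeq : pvAStep d p = d.insert r p.1 := by
      simp only [pvAStep, if_pos hc, hnk]
    rw [hAeq, hBeq]
    refine ⟨rfl, ?_⟩
    have hcdr : d.contains r = false := by rw [← hI1]; exact hff
    have := pvUnion_inv d (vis.foldl (fun q t => q.insert t r) par) r p.1
      ⟨hIC.1, hIC.2.1, fun k => by rw [hCeq k, hI1], hIC.2.2.2⟩ hcdr
    exact this
  · simp only [Bool.not_eq_true] at hc
    have hcp : par.contains (PySem.Str.len p.2) = false := by rw [hI1]; exact hc
    have hg : par.get? (PySem.Str.len p.2) = none :=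
      (PySem.Dict.get?_eq_none_iff_contains par (PySem.Str.len p.2)).mpr hcp
    have hfind : pvFind par (par.size + 1) (PySem.Str.len p.2) [] =
        (PySem.Str.len p.2, []) := by
      simp only [pvFind]
      rw [hg]
    have hBeq : pvBStep (d, par) p =
        (d.insert (PySem.Str.len p.2) p.1,
          par.insert (PySem.Str.len p.2) (PySem.Str.len p.2 + 1)) := by
      simp only [pvBStep, hfind]
      rfl
    have hAeq : pvAStep d p = d.insert (PySem.Str.len p.2) p.1 := by
      simp only [pvAStep, hc]
      rfl
    rw [hAeq, hBeq]
    exact ⟨rfl, pvUnion_inv d par (PySem.Str.len p.2) p.1 ⟨hnd, hnp, hI1, hI2⟩ hc⟩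

theorem pvFold (ctx : List (String × String)) :
    ∀ (d : PySem.Dict Int String) (par : PySem.Dict Int Int), pvInv d par →
      ctx.foldl pvAStep d = (ctx.foldl pvBStep (d, par)).1 := by
  induction ctx with
  | nil => intro d par _; rfl
  | cons p ctx ih =>
    intro d par hI
    obtain ⟨he, hI'⟩ := pvStep d par p hI
    rw [he] at hI'
    simp only [List.foldl_cons]
    rw [he]
    have := ih (pvBStep (d, par) p).1 (pvBStep (d, par) p).2 hI'
    simpa using this

theorem pvNodup_of_ofList_length :
    ∀ (xs : List Int), (PySem.Set.ofList xs).length = xs.length → xs.Nodup := by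
  have hle : ∀ (xs : List Int) (s : PySem.Set Int),
      (xs.foldl PySem.Set.add s).length ≤ s.length + xs.length := by
    intro xs
    induction xs with
    | nil => intro s; simp
    | cons x xs ih =>
      intro s
      have := ih (PySem.Set.add s x)
      have hadd : (PySem.Set.add s x).length ≤ s.length + 1 := by
        unfold PySem.Set.add
        split <;> simp
      simp only [List.foldl_cons, List.length_cons]
      omega
  have hmain : ∀ (xs : List Int) (s : PySem.Set Int),
      (xs.foldl PySem.Set.add s).length = s.length + xs.length →
      xs.Nodup ∧ ∀ x ∈ xs, x ∉ s := by
    intro xs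
    induction xs with
    | nil => intro s _; simp
    | cons x xs ih =>
      intro s heq
      by_cases hcx : PySem.Set.contains s x = true
      · exfalso
        have hsx : PySem.Set.add s x = s := by unfold PySem.Set.add; rw [if_pos hcx]
        have := hle xs s
        simp only [List.foldl_cons, hsx, List.length_cons] at heq ⊢
        omega
      · simp only [Bool.not_eq_true] at hcx
        have hsx : PySem.Set.add s x = s ++ [x] := by unfold PySem.Set.add; rw [hcx]; simp
        have hxs : x ∉ s := by
          intro hmem
          rw [← PySem.Set.contains_iff s x] at hmem
          rw [hcx] at hmem; cases hmem
        simp only [List.foldl_cons, hsx] at heq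
        have heq' : (xs.foldl PySem.Set.add (s ++ [x])).length = (s ++ [x]).length + xs.length := by
          simp at heq ⊢; omega
        obtain ⟨hnd, hfr⟩ := ih (s ++ [x]) heq'
        refine ⟨List.nodup_cons.mpr ⟨?_, hnd⟩, ?_⟩
        · intro hx
          exact hfr x hx (by simp)
        · intro y hy
          rcases List.mem_cons.mp hy with rfl | hy'
          · exact hxs
          · intro hys
            exact hfr y hy' (by simp [hys])
  intro xs h
  rw [PySem.Set.ofList_eq_foldl] at h
  exact (hmain xs [] (by simpa using h)).1

theorem pvFresh (ctx : List (String × String)) :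
    ∀ (d : PySem.Dict Int String),
      (ctx.map (fun p => PySem.Str.len p.2)).Nodup →
      (∀ p ∈ ctx, d.contains (PySem.Str.len p.2) = false) →
      ctx.foldl (fun d p => d.insert (PySem.Str.len p.2) p.1) d = ctx.foldl pvAStep d := by
  induction ctx with
  | nil => intro d _ _; rfl
  | cons p ctx ih =>
    intro d hnd hfr
    have hc : d.contains (PySem.Str.len p.2) = false := hfr p List.mem_cons_self
    have hstep : pvAStep d p = d.insert (PySem.Str.len p.2) p.1 := by
      simp only [pvAStep, hc]; rfl
    simp only [List.foldl_cons, hstep]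
    rw [List.map_cons, List.nodup_cons] at hnd
    apply ih
    · exact hnd.2
    · intro q hq
      rw [PySem.Dict.contains_insert]
      have hne : PySem.Str.len q.2 ≠ PySem.Str.len p.2 := by
        intro h
        exact hnd.1 (by rw [← h]; exact List.mem_map_of_mem hq)
      have hbe : (PySem.Str.len q.2 == PySem.Str.len p.2) = false := by simpa using hne
      rw [hbe, hfr q (List.mem_cons_of_mem p hq)]
      rfl

theorem pvInv_empty : pvInv PySem.Dict.empty PySem.Dict.empty := by
  refine ⟨by simp [PySem.Dict.keys_empty], by simp [PySem.Dict.keys_empty],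
    fun k => by simp [PySem.Dict.contains_empty], fun k j hg => by
      rw [PySem.Dict.get?_empty] at hg; cases hg⟩

-- ===== VERDICT (by name: the statement is the Claim_ definition above) =====
theorem get_filelengths_py_spec : Claim_equal_get_filelengths_py := by
  intro context _
  unfold Spec_get_filelengths_py get_filelengths_py get_filelengths_py_alt
  simp only []
  by_cases h : context.length = (PySem.Set.ofList (context.map (fun p => PySem.Str.len p.2))).length
  · rw [if_pos h]
    have hnd : (context.map (fun p => PySem.Str.len p.2)).Nodup := by
      apply pvNodup_of_ofList_length
      rw [h.symm]; simp
    rw [pvFresh context PySem.Dict.empty hnd (by intro p _; rfl),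
        pvFold context PySem.Dict.empty PySem.Dict.empty pvInv_empty]
  · rw [if_neg h, pvFold context PySem.Dict.empty PySem.Dict.empty pvInv_empty]
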